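-- pv_equiv track=rewrite | github.com/royh2149/Python-PyQt-Clock-App | UI.py | trunc
-- ===== SOURCE A (Python) =====
-- def trunc(string) -> (int, int):  # a function that returns (begin,end) indexes of first digits in string
--     beg = None
--     end = None
--     for i, char in enumerate(string):
--         if char in '0123456789':
--             if beg is None:
--                 beg = int(i)
--         elif beg is not None:
--             end = int(i)
--             break
--
--     return (beg, end)
-- ===== SOURCE B (Python) =====
-- import re
--
-- def trunc(string) -> (int, int):
--     m = re.search(r'[0-9]+', string)
--     if m is None:
--         return (None, None)
--     return (m.start(), m.end() if m.end() < len(string) else None)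
-- ===== Notes on version B (the rewrite author's own statement) =====
-- stated objective: idiomatic
-- what changed: Replaces the hand-written enumerate loop with its None/break state machine by a single re.search for the first digit run, reading start/end off the match object (end stays None when the run reaches the end of the string, as in A).
import Mathlib
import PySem

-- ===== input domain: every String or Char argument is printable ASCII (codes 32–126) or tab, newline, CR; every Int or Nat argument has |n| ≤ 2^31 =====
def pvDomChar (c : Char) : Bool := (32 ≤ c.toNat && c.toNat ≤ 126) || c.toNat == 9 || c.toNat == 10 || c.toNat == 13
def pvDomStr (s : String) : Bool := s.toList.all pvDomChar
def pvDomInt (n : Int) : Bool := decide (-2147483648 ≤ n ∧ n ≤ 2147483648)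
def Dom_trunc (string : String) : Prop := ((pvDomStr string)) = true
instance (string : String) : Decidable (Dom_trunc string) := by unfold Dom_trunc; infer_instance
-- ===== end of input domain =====

-- B replaces A's hand-written enumerate loop / state machine by a single regex search
-- (re.search('[0-9]+', string)) and reads start/end off the match; objective: idiomatic.

-- ===== PORT A =====
-- the for-loop of A with its state (beg, end) and the `break`
def truncLoop : List (Int × Char) → Option Int → Option Int → Option Int × Option Int
  | [], beg, e => (beg, e)
  | (i, c) :: rest, beg, e =>
    if ("0123456789".toList).contains c then
      truncLoop rest (if beg.isNone then some i else beg) e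
    else if beg.isSome then (beg, some i)
    else truncLoop rest beg e

def trunc (string : String) : Option Int × Option Int :=
  truncLoop (PySem.List.enumerate string.toList) none none

-- ===== PORT B =====
-- re.search('[0-9]+', string): the match, if any, starts at the first digit index and
-- extends over the maximal digit run from there (ported as findIdx? + takeWhile).
def trunc_alt (string : String) : Option Int × Option Int :=
  let cs := string.toList
  match cs.findIdx? (fun c => c.isDigit) with
  | none => (none, none)
  | some s =>
    let e := s + ((cs.drop s).takeWhile (fun c => c.isDigit)).length
    (some (s : Int), if e < cs.length then some (e : Int) else none)

-- ===== PRECONDITION & SPEC =====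
def Spec_trunc (string : String) (out : Option Int × Option Int) : Prop := out = trunc_alt string
instance (string : String) (out : Option Int × Option Int) : Decidable (Spec_trunc string out) := by unfold Spec_trunc; infer_instance

-- ===== CLAIM (what is proved, stated in full; the proofs are below) =====
def Claim_equal_trunc : Prop := ∀ (string : String), Dom_trunc string → Spec_trunc string (trunc string)

-- ===== LEMMAS AND PROOFS =====

-- A's membership test `char in '0123456789'` coincides with Char.isDigit
theorem digit_contains_eq (c : Char) : (("0123456789".toList).contains c) = c.isDigit := by
  have h : "0123456789".toList = ['0', '1', '2', '3', '4', '5', '6', '7', '8', '9'] := by decide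
  rw [h]
  simp only [List.contains_cons, List.contains_nil, Bool.or_false, Char.isDigit]
  rw [Bool.eq_iff_iff]
  simp [Char.ext_iff, UInt32.le_iff_toNat_le, UInt32.ext_iff]
  omega

-- phase 2 of A's loop: a digit was found at index b, scanning for the first non-digit
theorem truncLoop_run (cs : List Char) (k b : Int) :
    truncLoop (PySem.List.enumerate cs k) (some b) none =
      (some b,
        if (cs.takeWhile (fun c => c.isDigit)).length < cs.length then
          some (k + (cs.takeWhile (fun c => c.isDigit)).length) else none) := by
  induction cs generalizing k with
  | nil => simp [PySem.List.enumerate_nil, truncLoop]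
  | cons c cs ih =>
    rw [PySem.List.enumerate_cons, truncLoop, digit_contains_eq]
    by_cases hd : c.isDigit
    · simp only [hd, if_pos, Option.isNone_some, Bool.false_eq_true, if_false, ih,
        List.takeWhile_cons, List.length_cons]
      congr 1
      by_cases hlt : (cs.takeWhile (fun c => c.isDigit)).length < cs.length
      · rw [if_pos hlt, if_pos (by simpa using hlt)]
        congr 1
        push_cast
        ring
      · rw [if_neg hlt, if_neg (by simpa using hlt)]
    · simp [hd]

-- phase 1 of A's loop: no digit seen yet
theorem truncLoop_search (cs : List Char) (k : Int) :
    truncLoop (PySem.List.enumerate cs k) none none =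
      (match cs.findIdx? (fun c => c.isDigit) with
       | none => (none, none)
       | some s =>
         let e := s + ((cs.drop s).takeWhile (fun c => c.isDigit)).length
         (some (k + s), if e < cs.length then some (k + e) else none)) := by
  induction cs generalizing k with
  | nil => simp [PySem.List.enumerate_nil, truncLoop, List.findIdx?_nil]
  | cons c cs ih =>
    rw [PySem.List.enumerate_cons, truncLoop, digit_contains_eq, List.findIdx?_cons]
    by_cases hd : c.isDigit
    · simp only [if_pos, Option.isNone_none, truncLoop_run, List.drop_zero,
        List.takeWhile_cons, hd, List.length_cons]
      simp only [Nat.cast_zero, Int.add_zero, Nat.zero_add]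
      congr 1
      by_cases hlt : (cs.takeWhile (fun c => c.isDigit)).length < cs.length
      · rw [if_pos hlt, if_pos (by simpa [Nat.lt_succ_iff] using Nat.succ_lt_succ hlt)]
        congr 1
        push_cast
        ring
      · rw [if_neg hlt, if_neg (by omega)]
    · simp only [hd, Bool.false_eq_true, if_false, Option.isSome_none, ih]
      cases hfi : cs.findIdx? (fun c => c.isDigit) with
      | none => simp
      | some s =>
        simp only [Option.map_some, List.length_cons]
        have hdrop : (c :: cs).drop (s + 1) = cs.drop s := by simp
        simp only [hdrop]
        congr 1
        · congr 1
          push_cast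
          ring
        · by_cases hlt : s + ((cs.drop s).takeWhile (fun c => c.isDigit)).length < cs.length
          · rw [if_pos hlt, if_pos (by omega)]
            congr 1
            push_cast
            ring
          · rw [if_neg hlt, if_neg (by omega)]

-- ===== VERDICT (by name: the statement is the Claim_ definition above) =====
theorem trunc_spec : Claim_equal_trunc := by
  intro s _
  unfold Spec_trunc trunc trunc_alt
  rw [truncLoop_search]
  cases hfi : s.toList.findIdx? (fun c => c.isDigit) with
  | none => simp [hfi]
  | some i => simp [hfi]
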